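-- pv_equiv track=rewrite | github.com/jendas1/poly-classifier | poly_classifier/unrooted_poly_decider.py | get_new_labels
-- ===== SOURCE A (Python) =====
-- delta = 3
--
-- def get_new_labels(configurations, edge_configurations, old_labels):
--     new_labels = set()
--     for conf in configurations:
--         for i in range(delta):
--             pot_label = conf[i]
--             ok = True
--             for j in range(delta):
--                 first_label = conf[j]
--                 if i == j:
--                     continue
--                 found = False
--                 for sec_label in old_labels:
--                     if (first_label, sec_label) in edge_configurations or \
--                             (sec_label, first_label) in edge_configurations:
--                         found = True
--                 if not found:
--                     ok = False
--                     break
--             if ok: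
--                 new_labels.add(pot_label)
--     return new_labels
-- ===== SOURCE B (Python) =====
-- delta = 3
--
-- def get_new_labels(configurations, edge_configurations, old_labels):
--     olset = set(old_labels)
--     # satset = all labels that have an edge configuration with some old label
--     satset = set()
--     for a, b in edge_configurations:
--         if b in olset:
--             satset.add(a)
--         if a in olset:
--             satset.add(b)
--     new_labels = set()
--     for conf in configurations:
--         fails = [i for i in range(delta) if conf[i] not in satset]
--         if not fails:
--             for i in range(delta):
--                 new_labels.add(conf[i])
--         elif len(fails) == 1:
--             new_labels.add(conf[fails[0]])
--     return new_labels
-- ===== Notes on version B (the rewrite author's own statement) =====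
-- stated objective: faster
-- what changed: B precomputes once the set of labels having an edge configuration with some old label (one pass over edge_configurations against a hashed old-label set), then for each configuration branches on the count of positions whose label is outside that set (0 -> all three labels, 1 -> just that label, >=2 -> none), removing A's per-candidate rescan and its per-pair linear scans of old_labels and edge_configurations.
import Mathlib
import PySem

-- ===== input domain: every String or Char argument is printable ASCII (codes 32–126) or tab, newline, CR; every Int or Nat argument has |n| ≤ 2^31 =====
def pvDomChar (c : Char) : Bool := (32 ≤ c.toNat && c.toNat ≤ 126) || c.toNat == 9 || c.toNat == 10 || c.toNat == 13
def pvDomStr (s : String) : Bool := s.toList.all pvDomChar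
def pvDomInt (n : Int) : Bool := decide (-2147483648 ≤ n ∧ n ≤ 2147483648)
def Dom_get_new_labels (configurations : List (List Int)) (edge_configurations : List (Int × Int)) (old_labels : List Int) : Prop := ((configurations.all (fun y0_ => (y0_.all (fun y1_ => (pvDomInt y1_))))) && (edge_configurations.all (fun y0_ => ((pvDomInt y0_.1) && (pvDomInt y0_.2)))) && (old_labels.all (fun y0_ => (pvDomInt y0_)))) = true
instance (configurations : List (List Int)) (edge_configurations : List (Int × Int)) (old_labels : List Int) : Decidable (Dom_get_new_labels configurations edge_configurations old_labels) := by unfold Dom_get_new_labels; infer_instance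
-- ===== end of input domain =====

-- One line: B precomputes the set of labels having an edge configuration with an old label and
-- branches on the count of failing positions per configuration, instead of A's nested rescans;
-- objective: faster (measured).

-- ===== PORT A =====
-- A's innermost 'for sec_label in old_labels' loop setting 'found' (no break).
def gnl_found (edge_configurations : List (Int × Int)) (old_labels : List Int) (first_label : Int) : Bool :=
  old_labels.foldl
    (fun found sec_label =>
      if edge_configurations.contains (first_label, sec_label) ||
         edge_configurations.contains (sec_label, first_label) then true else found)
    false

-- A's 'for j in range(delta)' loop computing ok (the break only ends the loop early; no state
-- after it is used, so the all-form below is the same value). conf[j] never raises under Pre_;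
-- the .getD 0 is only reached outside Pre_.
def gnl_ok (edge_configurations : List (Int × Int)) (old_labels : List Int) (conf : List Int) (i : Int) : Bool :=
  (PySem.List.pyRange 0 3 1).all (fun j =>
    if i == j then true
    else gnl_found edge_configurations old_labels ((PySem.List.pyGet? conf j).getD 0))

def get_new_labels (configurations : List (List Int)) (edge_configurations : List (Int × Int)) (old_labels : List Int) : List Int :=
  configurations.foldl
    (fun new_labels conf =>
      (PySem.List.pyRange 0 3 1).foldl
        (fun new_labels i =>
          let pot_label := (PySem.List.pyGet? conf i).getD 0
          if gnl_ok edge_configurations old_labels conf i then PySem.Set.add new_labels pot_label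
          else new_labels)
        new_labels)
    PySem.Set.empty

-- ===== PORT B =====
-- B's 'for a, b in edge_configurations' loop building satset.
def gnl_satset (edge_configurations : List (Int × Int)) (old_labels : List Int) : PySem.Set Int :=
  let olset : PySem.Set Int := PySem.Set.ofList old_labels
  edge_configurations.foldl
    (fun satset p =>
      let satset := if PySem.Set.contains olset p.2 then PySem.Set.add satset p.1 else satset
      if PySem.Set.contains olset p.1 then PySem.Set.add satset p.2 else satset)
    PySem.Set.empty

def get_new_labels_alt (configurations : List (List Int)) (edge_configurations : List (Int × Int)) (old_labels : List Int) : List Int :=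
  let satset := gnl_satset edge_configurations old_labels
  configurations.foldl
    (fun new_labels conf =>
      let fails := (PySem.List.pyRange 0 3 1).filter
        (fun i => !(PySem.Set.contains satset ((PySem.List.pyGet? conf i).getD 0)))
      match fails with
      | [] => (PySem.List.pyRange 0 3 1).foldl
                (fun s i => PySem.Set.add s ((PySem.List.pyGet? conf i).getD 0)) new_labels
      | [f] => PySem.Set.add new_labels ((PySem.List.pyGet? conf f).getD 0)
      | _ => new_labels)
    PySem.Set.empty

-- ===== PRECONDITION & SPEC =====
-- Pre_ excludes exactly the inputs where A raises IndexError: any configuration shorter than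
-- delta = 3 makes some conf[i]/conf[j] access with index up to 2 fail before the conf is done.
def Pre_get_new_labels (configurations : List (List Int)) (edge_configurations : List (Int × Int)) (old_labels : List Int) : Prop :=
  ∀ conf ∈ configurations, 3 ≤ conf.length

instance (configurations : List (List Int)) (edge_configurations : List (Int × Int)) (old_labels : List Int) : Decidable (Pre_get_new_labels configurations edge_configurations old_labels) := by unfold Pre_get_new_labels; infer_instance

def pvWitness_get_new_labels : List (List Int) × (List (Int × Int)) × List Int :=
  ([[1, 2, 3], [2, 2, 4]], [(1, 5), (5, 2)], [5])

def Spec_get_new_labels (configurations : List (List Int)) (edge_configurations : List (Int × Int)) (old_labels : List Int) (out : List Int) : Prop := out = get_new_labels_alt configurations edge_configurations old_labels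
instance (configurations : List (List Int)) (edge_configurations : List (Int × Int)) (old_labels : List Int) (out : List Int) : Decidable (Spec_get_new_labels configurations edge_configurations old_labels out) := by unfold Spec_get_new_labels; infer_instance

-- ===== CLAIM (what is proved, stated in full; the proofs are below) =====
def Claim_equal_get_new_labels : Prop := ∀ (configurations : List (List Int)) (edge_configurations : List (Int × Int)) (old_labels : List Int), Dom_get_new_labels configurations edge_configurations old_labels → Pre_get_new_labels configurations edge_configurations old_labels → Spec_get_new_labels configurations edge_configurations old_labels (get_new_labels configurations edge_configurations old_labels)

-- ===== LEMMAS AND PROOFS =====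

-- A's 'found' accumulator loop equals the any-scan over old_labels.
lemma gnl_found_eq_any (ec : List (Int × Int)) (ol : List Int) (x : Int) :
    gnl_found ec ol x = ol.any (fun o => ec.contains (x, o) || ec.contains (o, x)) := by
  unfold gnl_found
  suffices h : ∀ (t : List Int) (b : Bool),
      t.foldl (fun found sec =>
        if ec.contains (x, sec) || ec.contains (sec, x) then true else found) b
      = (b || t.any fun o => ec.contains (x, o) || ec.contains (o, x)) by
    simpa using h ol false
  intro t
  induction t with
  | nil => simp
  | cons o t ih =>
    intro b
    simp only [List.foldl_cons, List.any_cons, ih]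
    cases hb : (ec.contains (x, o) || ec.contains (o, x)) <;> simp [hb]

-- membership in the precomputed satset
lemma mem_satset (ec : List (Int × Int)) (ol : List Int) (x : Int) :
    x ∈ gnl_satset ec ol ↔ ∃ p ∈ ec, (p.2 ∈ ol ∧ x = p.1) ∨ (p.1 ∈ ol ∧ x = p.2) := by
  unfold gnl_satset
  suffices h : ∀ acc : PySem.Set Int,
      x ∈ ec.foldl
        (fun satset p =>
          let satset := if PySem.Set.contains (PySem.Set.ofList ol) p.2 then PySem.Set.add satset p.1 else satset
          if PySem.Set.contains (PySem.Set.ofList ol) p.1 then PySem.Set.add satset p.2 else satset)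
        acc
      ↔ x ∈ acc ∨ ∃ p ∈ ec, (p.2 ∈ ol ∧ x = p.1) ∨ (p.1 ∈ ol ∧ x = p.2) by
    simpa [PySem.Set.empty] using h PySem.Set.empty
  induction ec with
  | nil => intro acc; simp
  | cons p t ih =>
    intro acc
    simp only [List.foldl_cons]
    rw [ih]
    have hstep :
        x ∈ (let s1 := if PySem.Set.contains (PySem.Set.ofList ol) p.2 then PySem.Set.add acc p.1 else acc
             if PySem.Set.contains (PySem.Set.ofList ol) p.1 then PySem.Set.add s1 p.2 else s1)
        ↔ x ∈ acc ∨ (p.2 ∈ ol ∧ x = p.1) ∨ (p.1 ∈ ol ∧ x = p.2) := by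
      by_cases h1 : p.1 ∈ ol <;> by_cases h2 : p.2 ∈ ol <;>
        simp only [PySem.Set.contains_iff, PySem.Set.mem_ofList] at * <;>
          simp [h1, h2, PySem.Set.mem_add] <;> tauto
    rw [hstep, List.exists_mem_cons_iff, or_assoc]

-- the precomputed-set lookup equals A's scan
lemma contains_satset_eq (ec : List (Int × Int)) (ol : List Int) (x : Int) :
    PySem.Set.contains (gnl_satset ec ol) x = gnl_found ec ol x := by
  rw [gnl_found_eq_any, Bool.eq_iff_iff]
  rw [PySem.Set.contains_iff, mem_satset]
  simp only [List.any_eq_true, Bool.or_eq_true, List.contains_iff_mem]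
  constructor
  · rintro ⟨⟨a, b⟩, hp, ⟨ho, rfl⟩ | ⟨ho, rfl⟩⟩
    · exact ⟨b, ho, Or.inl hp⟩
    · exact ⟨a, ho, Or.inr hp⟩
  · rintro ⟨o, ho, h | h⟩
    · exact ⟨(x, o), h, Or.inl ⟨ho, rfl⟩⟩
    · exact ⟨(o, x), h, Or.inr ⟨ho, rfl⟩⟩

-- per-configuration step equality, generic in the satisfiability predicate
lemma step_eq (sat : Int → Bool) (conf : List Int) (acc : List Int) :
    (PySem.List.pyRange 0 3 1).foldl
      (fun new_labels i =>
        if (PySem.List.pyRange 0 3 1).all (fun j =>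
            if i == j then true else sat ((PySem.List.pyGet? conf j).getD 0)) then
          PySem.Set.add new_labels ((PySem.List.pyGet? conf i).getD 0)
        else new_labels)
      acc
    =
    (match (PySem.List.pyRange 0 3 1).filter
        (fun i => !(sat ((PySem.List.pyGet? conf i).getD 0))) with
     | [] => (PySem.List.pyRange 0 3 1).foldl
               (fun s i => PySem.Set.add s ((PySem.List.pyGet? conf i).getD 0)) acc
     | [f] => PySem.Set.add acc ((PySem.List.pyGet? conf f).getD 0)
     | _ => acc) := by
  have hr : PySem.List.pyRange 0 3 1 = [0, 1, 2] := by decide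
  rw [hr]
  simp only [List.all_cons, List.all_nil, List.foldl_cons, List.foldl_nil, List.filter]
  by_cases h0 : sat ((PySem.List.pyGet? conf 0).getD 0) = true <;>
    by_cases h1 : sat ((PySem.List.pyGet? conf 1).getD 0) = true <;>
      by_cases h2 : sat ((PySem.List.pyGet? conf 2).getD 0) = true <;>
        simp [h0, h1, h2]

lemma gnl_ok_eq (ec : List (Int × Int)) (ol : List Int) (conf : List Int) (i : Int) :
    gnl_ok ec ol conf i =
      (PySem.List.pyRange 0 3 1).all (fun j =>
        if i == j then true
        else PySem.Set.contains (gnl_satset ec ol) ((PySem.List.pyGet? conf j).getD 0)) := by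
  unfold gnl_ok
  congr 1
  funext j
  rw [contains_satset_eq]

lemma fold_eq (ec : List (Int × Int)) (ol : List Int) (cs : List (List Int)) :
    ∀ acc : List Int,
    cs.foldl
      (fun new_labels conf =>
        (PySem.List.pyRange 0 3 1).foldl
          (fun new_labels i =>
            if (PySem.List.pyRange 0 3 1).all (fun j =>
                if i == j then true
                else PySem.Set.contains (gnl_satset ec ol) ((PySem.List.pyGet? conf j).getD 0)) then
              PySem.Set.add new_labels ((PySem.List.pyGet? conf i).getD 0)
            else new_labels)
          new_labels)
      acc
    =
    cs.foldl
      (fun new_labels conf =>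
        match (PySem.List.pyRange 0 3 1).filter
            (fun i => !(PySem.Set.contains (gnl_satset ec ol) ((PySem.List.pyGet? conf i).getD 0))) with
        | [] => (PySem.List.pyRange 0 3 1).foldl
                  (fun s i => PySem.Set.add s ((PySem.List.pyGet? conf i).getD 0)) new_labels
        | [f] => PySem.Set.add new_labels ((PySem.List.pyGet? conf f).getD 0)
        | _ => new_labels)
      acc := by
  induction cs with
  | nil => intro acc; rfl
  | cons c t ih =>
    intro acc
    simp only [List.foldl_cons]
    rw [step_eq]
    exact ih _

-- ===== VERDICT (by name: the statement is the Claim_ definition above) =====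
theorem get_new_labels_spec : Claim_equal_get_new_labels := by
  intro configurations ec ol _ _
  unfold Spec_get_new_labels get_new_labels get_new_labels_alt
  simp only [gnl_ok_eq]
  exact fold_eq ec ol configurations PySem.Set.empty
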